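-- pv_equiv track=rewrite | github.com/CurlyZhu/Ship_of_LMs | utils.py | build_substring_mapping
-- ===== SOURCE A (Python) =====
-- def build_substring_mapping(model_names):
--
-- 	# Given a full model_names dict over all models of interest,
-- 	# find and arrange all the superstrings of every model name.
-- 	# This is used together with correct_string_counts to remove repetitions during counting (e.g. RoBERTa contains BERT).
--
-- 	# Input:
-- 	# model_names: a model_names dict. This function should only be run on the full collection of model names (to capture all superstrings).
--
-- 	# Output:
-- 	# substring_mapping: a dict where the keys are the model names and the values are lists of superstrings for each model name. Both the keys and values are sorted from long to short.
--
-- 	substring_mapping = {}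
-- 	sorted_keys = sorted(model_names, key=len, reverse=True)
--
-- 	for i in range(len(sorted_keys)):
-- 		key = sorted_keys[i]
-- 		substring_mapping[key] = []
-- 		for longer_key in sorted_keys[:i]:
-- 			if key in longer_key:
-- 				substring_mapping[key].append(longer_key)
--
-- 	return substring_mapping
-- ===== SOURCE B (Python) =====
-- def build_substring_mapping(model_names):
--     # Instead of pairwise containment checks, enumerate every substring of each
--     # name and look it up in a hash set of the names: each name s (taken in the
--     # same long-to-short order) is distributed once to the bucket of every
--     # distinct key that occurs inside it as a proper substring.
--     order = sorted(model_names, key=len, reverse=True)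
--     keyset = set(order)
--     result = {k: [] for k in order}
--     for s in order:
--         seen = set()
--         n = len(s)
--         for i in range(n):
--             for j in range(i, n + 1):
--                 sub = s[i:j]
--                 if sub != s and sub in keyset and sub not in seen:
--                     seen.add(sub)
--                     result[sub].append(s)
--     return result
-- ===== Notes on version B (the rewrite author's own statement) =====
-- stated objective: faster
-- what changed: A collects each key's superstrings by pairwise 'key in longer_key' scans over all earlier keys (quadratic in the number of names); B instead enumerates every substring of each name once and looks it up in a hash set of the names, distributing each name to the buckets of the distinct keys contained in it, so no pairwise containment test between names remains.
import Mathlib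
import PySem

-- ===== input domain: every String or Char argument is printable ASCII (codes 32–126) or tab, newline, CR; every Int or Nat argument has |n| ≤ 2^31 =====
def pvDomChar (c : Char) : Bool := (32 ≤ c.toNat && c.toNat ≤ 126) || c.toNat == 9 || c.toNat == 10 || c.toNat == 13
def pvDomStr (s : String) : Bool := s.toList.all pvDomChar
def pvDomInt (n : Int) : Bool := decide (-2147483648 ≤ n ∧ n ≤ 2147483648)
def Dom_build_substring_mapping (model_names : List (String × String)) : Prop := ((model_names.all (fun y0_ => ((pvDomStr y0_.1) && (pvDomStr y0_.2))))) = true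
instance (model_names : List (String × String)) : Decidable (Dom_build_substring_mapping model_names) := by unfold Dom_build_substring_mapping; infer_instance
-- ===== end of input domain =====

-- B replaces A's pairwise containment scans (quadratic in the number of names) by substring
-- enumeration with a hash set of the names: each name distributes itself once to every distinct
-- key occurring inside it (objective: faster — measured faster on the generated timing inputs).


-- ===== PORT A =====
-- the dict argument is an association list; iterating the dict iterates its keys: first
-- occurrences of the first components, in order (PySem.List.dedup)
def build_substring_mapping (model_names : List (String × String)) : List (String × List String) :=
  let sorted_keys := PySem.List.sorted (PySem.List.dedup (model_names.map Prod.fst)) PySem.Str.len true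
  ((PySem.List.pyRange 0 (PySem.List.len sorted_keys) 1).foldl
    (fun d i =>
      let key := PySem.List.pyGetD sorted_keys i ""   -- i ∈ range(len), so always in range
      (PySem.List.slice sorted_keys none (some i)).foldl
        (fun d longer_key =>
          if PySem.Str.isIn key longer_key then d.modify key [] (fun l => l ++ [longer_key]) else d)
        (d.insert key []))
    PySem.Dict.empty).items

-- ===== PORT B =====
def build_substring_mapping_alt (model_names : List (String × String)) : List (String × List String) :=
  let order := PySem.List.sorted (PySem.List.dedup (model_names.map Prod.fst)) PySem.Str.len true
  let keyset : PySem.Set String := PySem.Set.ofList order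
  let result0 := order.foldl (fun d k => d.insert k ([] : List String)) PySem.Dict.empty
  (order.foldl
    (fun d s =>
      let n := PySem.Str.len s
      ((PySem.List.pyRange 0 n 1).foldl
        (fun (p : PySem.Dict String (List String) × PySem.Set String) i =>
          (PySem.List.pyRange i (n + 1) 1).foldl
            (fun p j =>
              let sub := PySem.Str.slice s (some i) (some j)
              if !(sub == s) && PySem.Set.contains keyset sub && !(PySem.Set.contains p.2 sub) then
                (p.1.modify sub [] (fun l => l ++ [s]), PySem.Set.add p.2 sub)
              else p)
            p)
        (d, (PySem.Set.empty : PySem.Set String))).1)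
    result0).items

-- ===== PRECONDITION & SPEC =====
def Spec_build_substring_mapping (model_names : List (String × String)) (out : List (String × List String)) : Prop := out = build_substring_mapping_alt model_names
instance (model_names : List (String × String)) (out : List (String × List String)) : Decidable (Spec_build_substring_mapping model_names out) := by unfold Spec_build_substring_mapping; infer_instance

-- ===== CLAIM (what is proved, stated in full; the proofs are below) =====
def Claim_equal_build_substring_mapping : Prop := ∀ (model_names : List (String × String)), Dom_build_substring_mapping model_names → Spec_build_substring_mapping model_names (build_substring_mapping model_names)

-- ===== LEMMAS AND PROOFS =====

-- the canonical value for key k over the sorted key list xs: the strictly longer names containing k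
def pvVal (xs : List String) (k : String) : List String :=
  xs.filter (fun s => decide (PySem.Str.len k < PySem.Str.len s) && PySem.Str.isIn k s)

theorem pv_not_mem_pre {pre rest : List String} {a : String}
    (hnd : (pre ++ a :: rest).Nodup) : a ∉ pre := by
  rw [List.nodup_append] at hnd
  exact fun ha => hnd.2.2 a ha a (List.mem_cons_self ..) rfl

-- ---------- A-side lemmas ----------

-- A's inner loop: repeated append-to-the-value of one key already present as the LAST item
theorem pv_innerFold (key : String) (ys : List String) (its : List (String × List String))
    (h : key ∉ its.map Prod.fst) (acc : List String) :
    ys.foldl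
      (fun d x => if PySem.Str.isIn key x then d.modify key [] (fun l => l ++ [x]) else d)
      (PySem.Dict.mk (its ++ [(key, acc)]))
    = PySem.Dict.mk (its ++ [(key, acc ++ ys.filter (fun x => PySem.Str.isIn key x))]) := by
  induction ys generalizing acc with
  | nil => simp
  | cons x ys ih =>
    have hne : ∀ p ∈ its, (p.1 == key) = false := by
      intro p hp
      have : p.1 ≠ key := fun hk => h (hk ▸ List.mem_map_of_mem hp)
      simp [this]
    by_cases hx : PySem.Str.isIn key x
    · have hget : (PySem.Dict.mk (its ++ [(key, acc)]) : PySem.Dict String (List String)).getD key [] = acc := by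
        simp only [PySem.Dict.getD, PySem.Dict.get?, List.find?_append]
        rw [List.find?_eq_none.mpr (by intro p hp; simp [hne p hp])]
        simp
      have hcont : (PySem.Dict.mk (its ++ [(key, acc)]) : PySem.Dict String (List String)).contains key = true := by
        simp [PySem.Dict.contains]
      have hmod : ((PySem.Dict.mk (its ++ [(key, acc)]) : PySem.Dict String (List String)).modify key []
          (fun l => l ++ [x])) = PySem.Dict.mk (its ++ [(key, acc ++ [x])]) := by
        simp only [PySem.Dict.modify, hget, PySem.Dict.insert, hcont, if_true]
        congr 1
        rw [List.map_append]
        congr 1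
        · exact (List.map_congr_left (fun p hp => by simp [hne p hp])).trans (List.map_id _)
        · simp
      rw [List.foldl_cons, if_pos hx, hmod, ih (acc ++ [x]), List.filter_cons, if_pos hx]
      simp
    · rw [List.foldl_cons, if_neg hx, ih acc, List.filter_cons, if_neg hx]

-- for distinct keys in length-descending order, the containing keys among the earlier ones
-- are exactly the strictly longer containing keys anywhere in the list
theorem pv_filter_prefix_eq (pre : List String) (a : String) (rest : List String)
    (hnd : (pre ++ a :: rest).Nodup)
    (hp : (pre ++ a :: rest).Pairwise (fun s t => PySem.Str.len t ≤ PySem.Str.len s)) :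
    pre.filter (fun x => PySem.Str.isIn a x) = pvVal (pre ++ a :: rest) a := by
  obtain ⟨hp1, hp2, hcross⟩ := List.pairwise_append.mp hp
  have hmem : a ∉ pre := pv_not_mem_pre hnd
  unfold pvVal
  rw [List.filter_append, List.filter_cons]
  have ha : (decide (PySem.Str.len a < PySem.Str.len a) && PySem.Str.isIn a a) = false := by simp
  have hrest : rest.filter (fun s => decide (PySem.Str.len a < PySem.Str.len s) && PySem.Str.isIn a s) = [] := by
    apply List.filter_eq_nil_iff.mpr
    intro s hs
    have hle : PySem.Str.len s ≤ PySem.Str.len a := (List.pairwise_cons.mp hp2).1 s hs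
    simp only [Bool.and_eq_true, decide_eq_true_eq, not_and]
    intro hlt; omega
  have hpre : pre.filter (fun x => PySem.Str.isIn a x)
      = pre.filter (fun s => decide (PySem.Str.len a < PySem.Str.len s) && PySem.Str.isIn a s) := by
    apply List.filter_congr
    intro x hx
    by_cases hin : PySem.Str.isIn a x
    · have hinf : a.toList <:+: x.toList := (PySem.Str.isIn_iff_infix a x).mp hin
      have hlen : a.toList.length ≤ x.toList.length := hinf.length_le
      have hne : a ≠ x := fun he => hmem (he ▸ hx)
      have hlt : PySem.Str.len a < PySem.Str.len x := by
        rcases lt_or_eq_of_le hlen with hl | he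
        · simp only [PySem.Str.len_eq]; exact_mod_cast hl
        · exact absurd (String.toList_inj.mp (hinf.eq_of_length he)) hne
      rw [decide_eq_true hlt, Bool.true_and]
    · have hf : PySem.Str.isIn a x = false := by
        simpa using hin
      rw [hf, Bool.and_false]
  rw [hpre, ha, hrest]
  simp

-- A's outer loop, processed prefix by prefix
theorem pv_outerFold (xs : List String) (hnd : xs.Nodup)
    (hp : xs.Pairwise (fun s t => PySem.Str.len t ≤ PySem.Str.len s)) :
    ∀ (rest pre : List String), xs = pre ++ rest →
    (PySem.List.enumerate rest (pre.length : Int)).foldl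
      (fun d pc =>
        (PySem.List.slice xs none (some pc.1)).foldl
          (fun d x => if PySem.Str.isIn pc.2 x then d.modify pc.2 [] (fun l => l ++ [x]) else d)
          (d.insert pc.2 []))
      (PySem.Dict.mk (pre.map (fun k => (k, pvVal xs k))))
    = PySem.Dict.mk (xs.map (fun k => (k, pvVal xs k))) := by
  intro rest
  induction rest with
  | nil => intro pre h; rw [PySem.List.enumerate_nil]; simp [h]
  | cons a rest ih =>
    intro pre h
    have hmem : a ∉ pre := pv_not_mem_pre (h ▸ hnd)
    rw [PySem.List.enumerate_cons, List.foldl_cons]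
    have hfresh : ((PySem.Dict.mk (pre.map (fun k => (k, pvVal xs k))) : PySem.Dict String (List String)).insert a [])
        = PySem.Dict.mk (pre.map (fun k => (k, pvVal xs k)) ++ [(a, [])]) := by
      have hc : (PySem.Dict.mk (pre.map (fun k => (k, pvVal xs k))) : PySem.Dict String (List String)).contains a = false := by
        simp only [PySem.Dict.contains_mk, List.any_eq_false]
        intro p hpm
        obtain ⟨k, hk, rfl⟩ := List.mem_map.mp hpm
        have : k ≠ a := fun he => hmem (he ▸ hk)
        simp [this]
      apply PySem.Dict.ext
      rw [PySem.Dict.items_insert_of_not_contains _ _ hc]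
    have hslice : PySem.List.slice xs none (some ((pre.length : Nat) : Int)) = pre := by
      rw [PySem.List.slice_to xs (by positivity), Int.toNat_natCast, h, List.take_left]
    rw [hfresh, hslice]
    have hkeys : a ∉ (pre.map (fun k => (k, pvVal xs k))).map Prod.fst := by
      simpa using hmem
    rw [pv_innerFold a pre _ hkeys []]
    rw [List.nil_append, pv_filter_prefix_eq pre a rest (h ▸ hnd) (h ▸ hp)]
    have hstep : pre.map (fun k => (k, pvVal xs k)) ++ [(a, pvVal (pre ++ a :: rest) a)]
        = (pre ++ [a]).map (fun k => (k, pvVal xs k)) := by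
      rw [List.map_append, h]; rfl
    rw [hstep]
    have hrec := ih (pre ++ [a]) (by simp [h])
    rw [show (((pre ++ [a]).length : Nat) : Int) = (pre.length : Int) + 1 by simp] at hrec
    exact hrec

-- the pyRange-with-indexing loop IS the enumerate loop
theorem pv_range_to_enumerate (xs : List String)
    (B : PySem.Dict String (List String) → Int → String → PySem.Dict String (List String)) :
    (PySem.List.pyRange 0 (PySem.List.len xs) 1).foldl
      (fun d i => B d i (PySem.List.pyGetD xs i "")) PySem.Dict.empty
    = (PySem.List.enumerate xs 0).foldl (fun d pc => B d pc.1 pc.2) PySem.Dict.empty := by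
  rw [PySem.List.enumerate_eq_map_pyRange xs "", List.foldl_map]

-- ---------- B-side lemmas ----------

-- B's per-character-pair step (bound names for the proofs; same term as in the port)
def pvStep (xs : List String) (s : String)
    (p : PySem.Dict String (List String) × PySem.Set String) (sub : String) :
    PySem.Dict String (List String) × PySem.Set String :=
  if !(sub == s) && PySem.Set.contains (PySem.Set.ofList xs) sub && !(PySem.Set.contains p.2 sub) then
    (p.1.modify sub [] (fun l => l ++ [s]), PySem.Set.add p.2 sub)
  else p

-- the substrings B enumerates for s, in generation order
def pvSubs (s : String) : List String :=
  (PySem.List.pyRange 0 (PySem.Str.len s) 1).flatMap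
    (fun i => (PySem.List.pyRange i (PySem.Str.len s + 1) 1).map
      (fun j => PySem.Str.slice s (some i) (some j)))

-- modifying an existing key of a keyed map rewrites exactly that entry
theorem pv_modify_mk (xs : List String) (hnd : xs.Nodup) (f : String → List String)
    (k : String) (hk : k ∈ xs) (s : String) :
    (PySem.Dict.mk (xs.map (fun t => (t, f t)))).modify k [] (fun l => l ++ [s])
      = PySem.Dict.mk (xs.map (fun t => (t, if t = k then f t ++ [s] else f t))) := by
  have hkeysnd : (PySem.Dict.mk (xs.map (fun t => (t, f t))) : PySem.Dict String (List String)).keys.Nodup := by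
    simpa [PySem.Dict.keys_mk, List.map_map, Function.comp_def] using hnd
  have hget : (PySem.Dict.mk (xs.map (fun t => (t, f t))) : PySem.Dict String (List String)).getD k [] = f k :=
    PySem.Dict.getD_of_mem_items _ (List.mem_map_of_mem (f := fun t => (t, f t)) hk) hkeysnd []
  have hcont : (PySem.Dict.mk (xs.map (fun t => (t, f t))) : PySem.Dict String (List String)).contains k = true := by
    rw [PySem.Dict.contains_iff_mem_keys]
    simpa [PySem.Dict.keys_mk, List.map_map, Function.comp_def] using hk
  apply PySem.Dict.ext
  simp only [PySem.Dict.modify, hget]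
  rw [PySem.Dict.items_insert_of_contains _ _ hcont]
  show (xs.map (fun t => (t, f t))).map _ = _
  rw [List.map_map]
  apply List.map_congr_left
  intro t _
  by_cases ht : t = k
  · simp [ht]
  · simp [ht]

-- effect of B's inner double loop, one candidate substring at a time
theorem pv_subsFold (xs : List String) (hnd : xs.Nodup) (s : String) :
    ∀ (subs : List String) (f : String → List String) (seen : PySem.Set String),
    (∀ u ∈ seen, u ≠ s ∧ u ∈ xs) →
    ∃ seen' : PySem.Set String,
      subs.foldl (pvStep xs s)
        (PySem.Dict.mk (xs.map (fun t => (t, if t ∈ seen then f t ++ [s] else f t))), seen)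
      = (PySem.Dict.mk (xs.map (fun t =>
          (t, if t ∈ seen ∨ (t ∈ subs ∧ t ≠ s ∧ t ∈ xs) then f t ++ [s] else f t))), seen')
      ∧ (∀ u ∈ seen', u ≠ s ∧ u ∈ xs) := by
  intro subs
  induction subs with
  | nil =>
    intro f seen hs
    refine ⟨seen, ?_, hs⟩
    simp
  | cons u subs ih =>
    intro f seen hs
    rw [List.foldl_cons]
    by_cases hcond : u ≠ s ∧ u ∈ xs ∧ u ∉ seen
    · obtain ⟨hus, hux, husn⟩ := hcond
      have hstep : pvStep xs s
          (PySem.Dict.mk (xs.map (fun t => (t, if t ∈ seen then f t ++ [s] else f t))), seen) u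
          = ((PySem.Dict.mk (xs.map (fun t => (t, if t ∈ seen then f t ++ [s] else f t)))).modify u []
              (fun l => l ++ [s]), PySem.Set.add seen u) := by
        unfold pvStep
        rw [if_pos]
        simp only [Bool.and_eq_true, Bool.not_eq_true', beq_eq_false_iff_ne, ne_eq]
        simp [hus]
        exact ⟨hux, husn⟩
      rw [hstep, pv_modify_mk xs hnd _ u hux s]
      have hmapeq : (xs.map (fun t =>
            (t, if t = u then (if t ∈ seen then f t ++ [s] else f t) ++ [s]
                else (if t ∈ seen then f t ++ [s] else f t))))
          = xs.map (fun t => (t, if t ∈ PySem.Set.add seen u then f t ++ [s] else f t)) := by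
        apply List.map_congr_left
        intro t _
        by_cases htu : t = u
        · subst htu
          rw [if_pos rfl, if_neg husn, if_pos ((PySem.Set.mem_add _ _ _).mpr (Or.inr rfl))]
        · rw [if_neg htu]
          have : (t ∈ PySem.Set.add seen u) ↔ t ∈ seen := by
            rw [PySem.Set.mem_add _ _ _]
            exact ⟨fun h => h.resolve_right htu, Or.inl⟩
          by_cases hts : t ∈ seen
          · rw [if_pos hts, if_pos (this.mpr hts)]
          · rw [if_neg hts, if_neg (fun h => hts (this.mp h))]
      rw [hmapeq]
      obtain ⟨seen', heq, hs'⟩ := ih f (PySem.Set.add seen u)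
        (by
          intro v hv
          rcases (PySem.Set.mem_add _ _ _).mp hv with hv | rfl
          · exact hs v hv
          · exact ⟨hus, hux⟩)
      refine ⟨seen', ?_, hs'⟩
      rw [heq]
      congr 1
      apply congrArg
      apply List.map_congr_left
      intro t _
      apply congrArg
      apply if_congr _ rfl rfl
      rw [PySem.Set.mem_add _ _ _]
      constructor
      · rintro ((ht | rfl) | ⟨h1, h2⟩)
        · exact Or.inl ht
        · exact Or.inr ⟨List.mem_cons_self .., hus, hux⟩
        · exact Or.inr ⟨List.mem_cons_of_mem _ h1, h2⟩
      · rintro (ht | ⟨h1, h2⟩)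
        · exact Or.inl (Or.inl ht)
        · rcases List.mem_cons.mp h1 with rfl | h1'
          · exact Or.inl (Or.inr rfl)
          · exact Or.inr ⟨h1', h2⟩
    · -- the step is a no-op: u = s, or u ∉ xs, or u already seen
      have hstep : pvStep xs s
          (PySem.Dict.mk (xs.map (fun t => (t, if t ∈ seen then f t ++ [s] else f t))), seen) u
          = (PySem.Dict.mk (xs.map (fun t => (t, if t ∈ seen then f t ++ [s] else f t))), seen) := by
        unfold pvStep
        rw [if_neg]
        intro hc
        simp only [Bool.and_eq_true, Bool.not_eq_true', beq_eq_false_iff_ne, ne_eq] at hc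
        obtain ⟨⟨hus, hcx⟩, hsn⟩ := hc
        have hux : u ∈ xs := (PySem.Set.mem_ofList _ _).mp ((PySem.Set.contains_iff _ _).mp hcx)
        have husn : u ∉ seen := fun h => by
          rw [(PySem.Set.contains_iff _ _).mpr h] at hsn
          exact absurd hsn (by simp)
        exact hcond ⟨hus, hux, husn⟩
      rw [hstep]
      obtain ⟨seen', heq, hs'⟩ := ih f seen hs
      refine ⟨seen', ?_, hs'⟩
      rw [heq]
      congr 1
      apply congrArg
      apply List.map_congr_left
      intro t _
      apply congrArg
      apply if_congr _ rfl rfl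
      rw [not_and, not_and] at hcond
      constructor
      · rintro (ht | ⟨h1, h2⟩)
        · exact Or.inl ht
        · exact Or.inr ⟨List.mem_cons_of_mem _ h1, h2⟩
      · rintro (ht | ⟨h1, h2, h3⟩)
        · exact Or.inl ht
        · rcases List.mem_cons.mp h1 with rfl | h1'
          · exact Or.inl (not_not.mp (hcond h2 h3))
          · exact Or.inr ⟨h1', h2, h3⟩

-- the enumerated substrings of s are exactly its infixes (none when s is empty)
theorem pv_mem_subs (s t : String) :
    t ∈ pvSubs s ↔ (t.toList <:+: s.toList ∧ s.toList ≠ []) := by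
  unfold pvSubs
  rw [List.mem_flatMap]
  constructor
  · rintro ⟨i, hi, ht⟩
    obtain ⟨hi0, hin⟩ := (PySem.List.mem_pyRange_one ..).mp hi
    obtain ⟨j, hj, rfl⟩ := List.mem_map.mp ht
    obtain ⟨hji, hjn⟩ := (PySem.List.mem_pyRange_one ..).mp hj
    have hslen : (0 : Int) < PySem.Str.len s := lt_of_le_of_lt hi0 hin
    have hne : s.toList ≠ [] := by
      intro h
      rw [PySem.Str.len_eq, h] at hslen
      simp at hslen
    refine ⟨?_, hne⟩
    have htl : (PySem.Str.slice s (some i) (some j)).toList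
        = (s.toList.drop i.toNat).take (j.toNat - i.toNat) := by
      simp only [PySem.Str.toList_slice, PySem.Chars.slice_eq_listSlice]
      exact PySem.List.slice_toNat _ hi0 (le_trans hi0 hji)
    rw [htl]
    exact List.IsInfix.trans ((List.take_prefix _ _).isInfix) ((List.drop_suffix _ _).isInfix)
  · rintro ⟨⟨u, v, huv⟩, hne⟩
    by_cases ht0 : t.toList = []
    · refine ⟨0, ?_, ?_⟩
      · rw [PySem.List.mem_pyRange_one]
        constructor
        · exact le_refl 0
        · rw [PySem.Str.len_eq]
          exact_mod_cast List.length_pos_iff.mpr hne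
      · apply List.mem_map.mpr
        refine ⟨0, ?_, ?_⟩
        · rw [PySem.List.mem_pyRange_one]
          constructor
          · exact le_refl 0
          · rw [PySem.Str.len_eq]; positivity
        · apply String.toList_inj.mp
          simp only [PySem.Str.toList_slice, PySem.Chars.slice_eq_listSlice]
          rw [show ((0 : Int) = ((0 : Nat) : Int)) from rfl, PySem.List.slice_natCast]
          simpa using ht0.symm
    · refine ⟨(u.length : Int), ?_, ?_⟩
      · rw [PySem.List.mem_pyRange_one]
        refine ⟨by positivity, ?_⟩
        rw [PySem.Str.len_eq, ← huv]
        have : 0 < t.toList.length := List.length_pos_iff.mpr ht0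
        simp only [List.length_append]
        push_cast
        omega
      · apply List.mem_map.mpr
        refine ⟨((u.length + t.toList.length : Nat) : Int), ?_, ?_⟩
        · rw [PySem.List.mem_pyRange_one]
          constructor
          · exact_mod_cast Nat.le_add_right _ _
          · rw [PySem.Str.len_eq, ← huv]
            simp only [List.length_append]
            push_cast
            omega
        · apply String.toList_inj.mp
          simp only [PySem.Str.toList_slice, PySem.Chars.slice_eq_listSlice]
          rw [PySem.List.slice_natCast, ← huv]
          rw [show u ++ t.toList ++ v = u ++ (t.toList ++ v) by simp]
          rw [List.drop_left]
          rw [Nat.add_sub_cancel_left]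
          exact List.take_left' rfl

-- "proper substring generated by B's enumeration" = "strictly shorter and contained"
theorem pv_subs_cond (s t : String) :
    (t ∈ pvSubs s ∧ t ≠ s)
      ↔ (decide (PySem.Str.len t < PySem.Str.len s) && PySem.Str.isIn t s) = true := by
  rw [Bool.and_eq_true, decide_eq_true_eq, PySem.Str.isIn_iff_infix, pv_mem_subs]
  constructor
  · rintro ⟨⟨hinf, hne⟩, hts⟩
    refine ⟨?_, hinf⟩
    have hle : t.toList.length ≤ s.toList.length := hinf.length_le
    rcases lt_or_eq_of_le hle with hl | he
    · simp only [PySem.Str.len_eq]; exact_mod_cast hl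
    · exact absurd (String.toList_inj.mp (hinf.eq_of_length he)) hts
  · rintro ⟨hlt, hinf⟩
    have hlt' : t.toList.length < s.toList.length := by
      simpa [PySem.Str.len_eq] using hlt
    refine ⟨⟨hinf, ?_⟩, ?_⟩
    · intro h; rw [h] at hlt'; simp at hlt'
    · intro h; rw [h] at hlt'; omega

-- initializing the result dict: one empty bucket per key, in order
theorem pv_init_fold (ys : List String) (hys : ys.Nodup) :
    ∀ (d : PySem.Dict String (List String)), (∀ k ∈ ys, d.contains k = false) →
    ys.foldl (fun d k => d.insert k ([] : List String)) d
      = PySem.Dict.mk (d.items ++ ys.map (fun k => (k, []))) := by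
  induction ys with
  | nil => intro d _; simp
  | cons y ys ih =>
    intro d hd
    rw [List.foldl_cons]
    have h1 : d.insert y [] = PySem.Dict.mk (d.items ++ [(y, [])]) := by
      apply PySem.Dict.ext
      rw [PySem.Dict.items_insert_of_not_contains _ _ (hd y (List.mem_cons_self ..))]
    rw [h1, ih (List.nodup_cons.mp hys).2 _ (by
      intro k hk
      rw [PySem.Dict.contains_mk]
      simp only [List.any_append, Bool.or_eq_false_iff]
      constructor
      · have := hd k (List.mem_cons_of_mem _ hk)
        rwa [PySem.Dict.contains_mk] at this
      · have hky : k ≠ y := fun he => (List.nodup_cons.mp hys).1 (he ▸ hk)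
        simp [Ne.symm hky])]
    simp


-- B's whole outer loop over the (nodup) key list
theorem pv_outerB (xs : List String) (hnd : xs.Nodup) :
    ∀ (ss : List String) (f : String → List String),
    ss.foldl
      (fun d s =>
        ((PySem.List.pyRange 0 (PySem.Str.len s) 1).foldl
          (fun (p : PySem.Dict String (List String) × PySem.Set String) i =>
            (PySem.List.pyRange i (PySem.Str.len s + 1) 1).foldl
              (fun p j =>
                let sub := PySem.Str.slice s (some i) (some j)
                if !(sub == s) && PySem.Set.contains (PySem.Set.ofList xs) sub && !(PySem.Set.contains p.2 sub) then
                  (p.1.modify sub [] (fun l => l ++ [s]), PySem.Set.add p.2 sub)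
                else p)
              p)
          (d, (PySem.Set.empty : PySem.Set String))).1)
      (PySem.Dict.mk (xs.map (fun t => (t, f t))))
    = PySem.Dict.mk (xs.map (fun t => (t, f t ++ pvVal ss t))) := by
  intro ss
  induction ss with
  | nil =>
    intro f
    simp [pvVal]
  | cons s ss ih =>
    intro f
    rw [List.foldl_cons]
    have hflat : ∀ (d : PySem.Dict String (List String)),
        ((PySem.List.pyRange 0 (PySem.Str.len s) 1).foldl
          (fun (p : PySem.Dict String (List String) × PySem.Set String) i =>
            (PySem.List.pyRange i (PySem.Str.len s + 1) 1).foldl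
              (fun p j =>
                let sub := PySem.Str.slice s (some i) (some j)
                if !(sub == s) && PySem.Set.contains (PySem.Set.ofList xs) sub && !(PySem.Set.contains p.2 sub) then
                  (p.1.modify sub [] (fun l => l ++ [s]), PySem.Set.add p.2 sub)
                else p)
              p)
          (d, (PySem.Set.empty : PySem.Set String)))
        = (pvSubs s).foldl (pvStep xs s) (d, (PySem.Set.empty : PySem.Set String)) := by
      intro d
      unfold pvSubs
      rw [List.foldl_flatMap]
      simp only [List.foldl_map]
      rfl
    rw [hflat]
    have hshape : (PySem.Dict.mk (xs.map (fun t => (t, f t))) : PySem.Dict String (List String))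
        = PySem.Dict.mk (xs.map (fun t =>
            (t, if t ∈ (PySem.Set.empty : PySem.Set String) then f t ++ [s] else f t))) := by
      apply congrArg
      apply List.map_congr_left
      intro t _
      simp [PySem.Set.empty]
    rw [hshape]
    obtain ⟨seen', heq, _⟩ := pv_subsFold xs hnd s (pvSubs s) f
      (PySem.Set.empty : PySem.Set String) (by intro u hu; simp [PySem.Set.empty] at hu)
    rw [heq]
    have hmid : (PySem.Dict.mk (xs.map (fun t =>
          (t, if t ∈ (PySem.Set.empty : PySem.Set String) ∨ (t ∈ pvSubs s ∧ t ≠ s ∧ t ∈ xs)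
              then f t ++ [s] else f t))) : PySem.Dict String (List String))
        = PySem.Dict.mk (xs.map (fun t =>
            (t, if (decide (PySem.Str.len t < PySem.Str.len s) && PySem.Str.isIn t s) = true
                then f t ++ [s] else f t))) := by
      apply congrArg
      apply List.map_congr_left
      intro t htx
      apply congrArg
      apply if_congr _ rfl rfl
      rw [show (t ∈ (PySem.Set.empty : PySem.Set String)) = False by
        simp [PySem.Set.empty]]
      rw [false_or]
      constructor
      · rintro ⟨h1, h2, _⟩
        exact (pv_subs_cond s t).mp ⟨h1, h2⟩
      · intro h
        obtain ⟨h1, h2⟩ := (pv_subs_cond s t).mpr h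
        exact ⟨h1, h2, htx⟩
    rw [hmid, ih]
    apply congrArg
    apply List.map_congr_left
    intro t _
    apply congrArg
    unfold pvVal
    rw [List.filter_cons]
    by_cases hq : (decide (PySem.Str.len t < PySem.Str.len s) && PySem.Str.isIn t s) = true
    · rw [if_pos hq, if_pos hq, List.append_assoc]
      rfl
    · rw [if_neg hq, if_neg hq]

-- ===== VERDICT (by name: the statement is the Claim_ definition above) =====
theorem build_substring_mapping_spec : Claim_equal_build_substring_mapping := by
  intro model_names _
  show build_substring_mapping model_names = build_substring_mapping_alt model_names
  simp only [build_substring_mapping, build_substring_mapping_alt]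
  set xs := PySem.List.sorted (PySem.List.dedup (model_names.map Prod.fst)) PySem.Str.len true with hxs
  have hnd : xs.Nodup :=
    (PySem.List.sorted_perm (PySem.List.dedup (model_names.map Prod.fst)) PySem.Str.len true).symm.nodup
      (PySem.List.nodup_dedup _)
  have hp : xs.Pairwise (fun s t => PySem.Str.len t ≤ PySem.Str.len s) :=
    PySem.List.sorted_pairwise_rev _ _
  -- A's side
  rw [pv_range_to_enumerate xs
    (fun d i key =>
      (PySem.List.slice xs none (some i)).foldl
        (fun d longer_key =>
          if PySem.Str.isIn key longer_key then d.modify key [] (fun l => l ++ [longer_key]) else d)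
        (d.insert key []))]
  have h0 : (PySem.Dict.empty : PySem.Dict String (List String))
      = PySem.Dict.mk (([] : List String).map (fun k => (k, pvVal xs k))) := rfl
  -- B's side first (so that the rewrite of A's empty dict does not capture B's)
  have hinit : xs.foldl (fun d k => d.insert k ([] : List String)) PySem.Dict.empty
      = PySem.Dict.mk (xs.map (fun k => (k, []))) := by
    rw [pv_init_fold xs hnd PySem.Dict.empty (by intro k _; simp)]
    rfl
  rw [hinit, pv_outerB xs hnd xs (fun _ => [])]
  rw [h0, show (0 : Int) = ((([] : List String).length : Nat) : Int) by simp]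
  rw [pv_outerFold xs hnd hp xs [] rfl]
  apply congrArg
  apply congrArg
  apply List.map_congr_left
  intro t _
  simp
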